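-- pv_equiv track=rewrite | github.com/eclipse-efbt/efbt | birds_nest/pybirdai/utils/clone_mode/metadata/helpers.py | determine_workflow_progress
-- ===== SOURCE A (Python) =====
-- def determine_workflow_progress(step_completions: list, step_names: list) -> tuple:
--     """
--     Determine the last completed step and overall status from a list of step completions.
--
--     Args:
--         step_completions: List of booleans indicating if each step is complete (in order)
--         step_names: List of step name suffixes (e.g., ['task1', 'task2', 'task3', 'task4'])
--
--     Returns:
--         tuple: (last_step_number, overall_status_string)
--     """
--     last_step = 0
--     overall_status = 'pending'
--
--     for i, (is_complete, step_name) in enumerate(zip(step_completions, step_names), 1):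
--         if is_complete:
--             last_step = i
--             overall_status = f'{step_name}_complete'
--
--     return last_step, overall_status
-- ===== SOURCE B (Python) =====
-- def determine_workflow_progress(step_completions: list, step_names: list) -> tuple:
--     """Reverse scan with early exit: first completed step from the end wins."""
--     pairs = list(zip(step_completions, step_names))
--     for i in range(len(pairs), 0, -1):
--         is_complete, step_name = pairs[i - 1]
--         if is_complete:
--             return i, f'{step_name}_complete'
--     return 0, 'pending'
-- ===== Notes on version B (the rewrite author's own statement) =====
-- stated objective: alternative
-- what changed: Forward full scan that overwrites the accumulator on every completed step is replaced by a reverse scan over the zipped pairs that returns immediately at the first (i.e. last) completed step.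
import Mathlib
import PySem

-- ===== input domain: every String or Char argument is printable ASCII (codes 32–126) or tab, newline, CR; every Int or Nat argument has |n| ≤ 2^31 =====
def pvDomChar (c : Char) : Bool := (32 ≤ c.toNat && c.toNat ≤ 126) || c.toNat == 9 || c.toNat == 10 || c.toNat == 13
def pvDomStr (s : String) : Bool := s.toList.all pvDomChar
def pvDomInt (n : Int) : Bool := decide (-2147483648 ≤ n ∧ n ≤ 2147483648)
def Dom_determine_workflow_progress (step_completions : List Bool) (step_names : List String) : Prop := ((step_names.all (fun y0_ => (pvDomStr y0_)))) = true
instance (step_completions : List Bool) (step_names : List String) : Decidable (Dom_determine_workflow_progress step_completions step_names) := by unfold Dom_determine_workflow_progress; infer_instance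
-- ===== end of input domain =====

-- B replaces A's forward scan (which overwrites its accumulator on every completed
-- step) by a reverse scan over the zipped pairs that returns at the first hit;
-- same O(n) cost, different traversal. Equivalence is proved on all inputs.

-- ===== PORT A =====
-- A's loop state: (last_step, overall_status, i); i is the 1-based enumerate counter.
def determine_workflow_progress (step_completions : List Bool) (step_names : List String) : Int × String :=
  let r := (step_completions.zip step_names).foldl
    (fun (st : Int × String × Int) p =>
      if p.1 then (st.2.2, p.2 ++ "_complete", st.2.2 + 1)
      else (st.1, st.2.1, st.2.2 + 1))
    (0, "pending", 1)
  (r.1, r.2.1)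

-- ===== PORT B =====
-- Source B's 'for i in range(len(pairs), 0, -1)' with pairs[i-1]: recursion over the
-- reversed pair list, carrying i downwards, early return at the first complete pair.
def pvRevScan : List (Bool × String) → Int → Int × String
  | [], _ => (0, "pending")
  | p :: rest, i => if p.1 then (i, p.2 ++ "_complete") else pvRevScan rest (i - 1)

def determine_workflow_progress_alt (step_completions : List Bool) (step_names : List String) : Int × String :=
  let pairs := step_completions.zip step_names
  pvRevScan pairs.reverse (pairs.length : Int)

-- ===== PRECONDITION & SPEC =====
def Spec_determine_workflow_progress (step_completions : List Bool) (step_names : List String) (out : Int × String) : Prop := out = determine_workflow_progress_alt step_completions step_names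
instance (step_completions : List Bool) (step_names : List String) (out : Int × String) : Decidable (Spec_determine_workflow_progress step_completions step_names out) := by unfold Spec_determine_workflow_progress; infer_instance

-- ===== CLAIM (what is proved, stated in full; the proofs are below) =====
def Claim_equal_determine_workflow_progress : Prop := ∀ (step_completions : List Bool) (step_names : List String), Dom_determine_workflow_progress step_completions step_names → Spec_determine_workflow_progress step_completions step_names (determine_workflow_progress step_completions step_names)

-- ===== LEMMAS AND PROOFS =====

-- A's fold over l equals B's reverse scan, and A's counter ends at l.length + 1.
theorem pv_fold_eq_revScan (l : List (Bool × String)) :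
    l.foldl
      (fun (st : Int × String × Int) p =>
        if p.1 then (st.2.2, p.2 ++ "_complete", st.2.2 + 1)
        else (st.1, st.2.1, st.2.2 + 1))
      (0, "pending", 1)
    = ((pvRevScan l.reverse (l.length : Int)).1,
       (pvRevScan l.reverse (l.length : Int)).2,
       (l.length : Int) + 1) := by
  induction l using List.reverseRecOn with
  | nil => simp [pvRevScan]
  | append_singleton l a ih =>
      rw [List.foldl_append, ih]
      simp only [List.reverse_append, List.reverse_singleton, List.singleton_append,
        List.length_append, List.length_singleton, List.foldl_cons, List.foldl_nil]
      cases h : a.1 <;> simp [pvRevScan, h]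

-- ===== VERDICT (by name: the statement is the Claim_ definition above) =====
theorem determine_workflow_progress_spec : Claim_equal_determine_workflow_progress := by
  intro sc sn _
  unfold Spec_determine_workflow_progress determine_workflow_progress determine_workflow_progress_alt
  simp only [pv_fold_eq_revScan]
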